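-- pv_equiv track=rewrite | github.com/tthanh1223/Schoolwork | goodStudent.py | maximum_number_students_above_average
-- ===== SOURCE A (Python) =====
-- def maximum_number_students_above_average(points: list[int]):
--     max1 = 0
--     count = 0
--     best_start = 0
--     current_start = 0
--     for i,score in enumerate(points):
--         if score >= 50:
--             if count == 0:
--                 current_start = i
--             count += 1
--             if count > max1:
--                 max1 = count
--                 best_start = current_start
--         else:
--             count = 0
--     subs = points[best_start:best_start+max1]
--     return max1, subs
-- ===== SOURCE B (Python) =====
-- def maximum_number_students_above_average(points: list[int]):
--     # Split into maximal consecutive runs of scores >= 50, then pick the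
--     # first longest run (max keeps the first maximum, matching A).
--     runs = []
--     cur = []
--     for s in points:
--         if s >= 50:
--             cur.append(s)
--         else:
--             if cur:
--                 runs.append(cur)
--             cur = []
--     if cur:
--         runs.append(cur)
--     if not runs:
--         return 0, []
--     best = max(runs, key=len)
--     return len(best), best
-- ===== Notes on version B (the rewrite author's own statement) =====
-- stated objective: idiomatic
-- what changed: B materializes the maximal runs of scores >= 50 in one pass and selects the first longest with max(key=len), instead of A's four-counter index bookkeeping plus a final slice.
import Mathlib
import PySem

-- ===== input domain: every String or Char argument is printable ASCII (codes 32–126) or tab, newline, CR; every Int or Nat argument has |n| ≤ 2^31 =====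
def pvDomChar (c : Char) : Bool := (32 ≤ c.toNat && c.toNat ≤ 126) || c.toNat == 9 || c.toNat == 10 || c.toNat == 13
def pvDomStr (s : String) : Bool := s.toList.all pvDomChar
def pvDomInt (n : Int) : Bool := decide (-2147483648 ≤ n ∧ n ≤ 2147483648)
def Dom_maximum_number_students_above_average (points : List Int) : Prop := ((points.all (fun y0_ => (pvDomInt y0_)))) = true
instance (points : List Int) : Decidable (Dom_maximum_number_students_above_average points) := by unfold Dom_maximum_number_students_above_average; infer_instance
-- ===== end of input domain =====

-- B replaces A's four-counter index bookkeeping (and final slice) with the idiomatic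
-- "split into maximal runs of scores ≥ 50, take the first longest" decomposition.

-- ===== PORT A =====
-- loop body of A: state (max1, count, best_start, current_start), element (i, score)
def pvStepA (st : Int × Int × Int × Int) (p : Int × Int) : Int × Int × Int × Int :=
  if p.2 ≥ 50 then
    let current_start := if st.2.1 = 0 then p.1 else st.2.2.2
    let count := st.2.1 + 1
    if count > st.1 then (count, count, current_start, current_start)
    else (st.1, count, st.2.2.1, current_start)
  else (st.1, 0, st.2.2.1, st.2.2.2)

def maximum_number_students_above_average (points : List Int) : Int × List Int :=
  let st := (PySem.List.enumerate points).foldl pvStepA (0, 0, 0, 0)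
  (st.1, PySem.List.slice points (some st.2.2.1) (some (st.2.2.1 + st.1)))

-- ===== PORT B =====
-- loop body of B: state (runs, cur)
def pvStepB (st : List (List Int) × List Int) (s : Int) : List (List Int) × List Int :=
  if s ≥ 50 then (st.1, st.2 ++ [s])
  else if st.2 ≠ [] then (st.1 ++ [st.2], []) else (st.1, [])

def maximum_number_students_above_average_alt (points : List Int) : Int × List Int :=
  let st := points.foldl pvStepB ([], [])
  let runs := if st.2 ≠ [] then st.1 ++ [st.2] else st.1
  match runs with
  | [] => (0, [])
  | r :: rs =>
      -- max(runs, key=len): keeps the first run on length ties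
      let best := rs.foldl (fun b c => if c.length > b.length then c else b) r
      ((best.length : Int), best)

-- ===== PRECONDITION & SPEC =====
def Spec_maximum_number_students_above_average (points : List Int) (out : Int × List Int) : Prop := out = maximum_number_students_above_average_alt points
instance (points : List Int) (out : Int × List Int) : Decidable (Spec_maximum_number_students_above_average points out) := by unfold Spec_maximum_number_students_above_average; infer_instance

-- ===== CLAIM (what is proved, stated in full; the proofs are below) =====
def Claim_equal_maximum_number_students_above_average : Prop := ∀ (points : List Int), Dom_maximum_number_students_above_average points → Spec_maximum_number_students_above_average points (maximum_number_students_above_average points)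

-- ===== LEMMAS AND PROOFS =====

-- "first longest run" selection, as B computes it from the run list
def pvF (runs : List (List Int)) : Int × List Int :=
  match runs with
  | [] => (0, [])
  | r :: rs =>
      let best := rs.foldl (fun b c => if c.length > b.length then c else b) r
      ((best.length : Int), best)

def pvRunsOf (st : List (List Int) × List Int) : List (List Int) :=
  if st.2 ≠ [] then st.1 ++ [st.2] else st.1

lemma pv_alt_eq (points : List Int) :
    maximum_number_students_above_average_alt points
      = pvF (pvRunsOf (points.foldl pvStepB ([], []))) := by
  simp only [maximum_number_students_above_average_alt, pvF, pvRunsOf]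

lemma pvF_append (rs : List (List Int)) (c : List Int) (hc : c ≠ []) :
    pvF (rs ++ [c]) = if ((c.length : Int)) > (pvF rs).1 then ((c.length : Int), c) else pvF rs := by
  cases rs with
  | nil =>
      have hlen : 0 < c.length := List.length_pos_of_ne_nil hc
      simp [pvF]
  | cons r rs' =>
      simp only [List.cons_append, pvF, List.foldl_append, List.foldl_cons, List.foldl_nil]
      by_cases h : c.length > (rs'.foldl (fun b c => if c.length > b.length then c else b) r).length
      · simp [h]
      · simp [h]

lemma pv_take_drop_append (p : List Int) (x : Int) (bs m : ℕ) (h : bs + m ≤ p.length) :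
    ((p ++ [x]).drop bs).take m = (p.drop bs).take m := by
  rw [List.drop_append_of_le_length (by omega)]
  rw [List.take_append_of_le_length (by simp; omega)]

lemma pv_inv (p : List Int) :
    ∃ (m bs : ℕ) (cs : Int),
      (PySem.List.enumerate p).foldl pvStepA (0, 0, 0, 0)
        = ((m : Int), (((p.foldl pvStepB ([], [])).2.length : ℕ) : Int), (bs : Int), cs) ∧
      ((p.foldl pvStepB ([], [])).2 ≠ [] →
        cs = ((p.length - (p.foldl pvStepB ([], [])).2.length : ℕ) : Int)) ∧
      bs + m ≤ p.length ∧
      (∃ p0, p = p0 ++ (p.foldl pvStepB ([], [])).2) ∧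
      pvF (pvRunsOf (p.foldl pvStepB ([], []))) = ((m : Int), (p.drop bs).take m) := by
  induction p using List.reverseRecOn with
  | nil =>
      exact ⟨0, 0, 0, by simp [PySem.List.enumerate], by simp, by simp, ⟨[], by simp⟩,
        by simp [pvF, pvRunsOf]⟩
  | append_singleton p x ih =>
      obtain ⟨m, bs, cs, ha, hcs, hle, ⟨p0, hp0⟩, hf⟩ := ih
      have hfoldB : (p ++ [x]).foldl pvStepB ([], [])
          = pvStepB (p.foldl pvStepB ([], [])) x := by
        rw [List.foldl_append]; rfl
      have hfoldA : (PySem.List.enumerate (p ++ [x])).foldl pvStepA (0, 0, 0, 0)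
          = pvStepA ((PySem.List.enumerate p).foldl pvStepA (0, 0, 0, 0)) (((p.length : ℕ) : Int), x) := by
        rw [PySem.List.enumerate_append, List.foldl_append]
        simp [PySem.List.enumerate_cons, PySem.List.enumerate_nil]
      set bb := p.foldl pvStepB ([], []) with hbb
      by_cases hx : x ≥ 50
      · -- score ≥ 50: the trailing run grows by one
        by_cases hcur : bb.2 = []
        · -- previous trailing run empty: a fresh run [x] starts at index p.length
          have hb2 : (pvStepB bb x).2 = [x] := by simp [pvStepB, hx, hcur]
          have hb1 : (pvStepB bb x).1 = bb.1 := by simp [pvStepB, hx]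
          have hfprev : pvF bb.1 = ((m : Int), (p.drop bs).take m) := by
            rw [← hf]; simp [pvRunsOf, hcur]
          have hA : pvStepA ((PySem.List.enumerate p).foldl pvStepA (0, 0, 0, 0)) (((p.length : ℕ) : Int), x)
              = if (1 : Int) > (m : Int) then ((1 : Int), 1, ((p.length : ℕ) : Int), ((p.length : ℕ) : Int))
                else ((m : Int), 1, (bs : Int), ((p.length : ℕ) : Int)) := by
            rw [ha]; simp [pvStepA, hx, hcur]
          have hfnew : pvF (pvRunsOf (pvStepB bb x))
              = if (1 : Int) > (m : Int) then ((1 : Int), [x]) else ((m : Int), (p.drop bs).take m) := by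
            have h1 : pvRunsOf (pvStepB bb x) = bb.1 ++ [[x]] := by simp [pvRunsOf, hb2, hb1]
            rw [h1, pvF_append _ _ (by simp), hfprev]
            simp
          by_cases hm : (1 : Int) > (m : Int)
          · refine ⟨1, p.length, ((p.length : ℕ) : Int), ?_, ?_,
              by simp only [List.length_append, List.length_cons, List.length_nil]; omega,
              ⟨p, by rw [hfoldB, hb2]⟩, ?_⟩
            · rw [hfoldA, hA, hfoldB, hb2]; simp [hm]
            · intro _; rw [hfoldB, hb2]; simp
            · rw [hfoldB, hfnew, if_pos hm]
              simp
          · refine ⟨m, bs, ((p.length : ℕ) : Int), ?_, ?_,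
              by simp only [List.length_append, List.length_cons, List.length_nil]; omega,
              ⟨p, by rw [hfoldB, hb2]⟩, ?_⟩
            · rw [hfoldA, hA, hfoldB, hb2]; simp [hm]
            · intro _; rw [hfoldB, hb2]; simp
            · rw [hfoldB, hfnew, if_neg hm, pv_take_drop_append p x bs m hle]
        · -- previous trailing run nonempty: it extends to cur ++ [x]
          have hcl : 0 < bb.2.length := List.length_pos_of_ne_nil hcur
          have hlen0 : p.length = p0.length + bb.2.length := by
            have h := congrArg List.length hp0; simpa using h
          have hcsv := hcs hcur
          have hb2 : (pvStepB bb x).2 = bb.2 ++ [x] := by simp [pvStepB, hx]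
          have hb1 : (pvStepB bb x).1 = bb.1 := by simp [pvStepB, hx]
          have hfprev : (if ((bb.2.length : ℕ) : Int) > (pvF bb.1).1
                then (((bb.2.length : ℕ) : Int), bb.2) else pvF bb.1)
              = ((m : Int), (p.drop bs).take m) := by
            rw [← pvF_append _ _ hcur, ← hf]; simp [pvRunsOf, hcur]
          -- A's condition count+1 > max1 coincides with "extended run beats previous runs"
          have hcond : ((bb.2.length : Int) + 1 > (m : Int)) ↔ ((bb.2.length : Int) + 1 > (pvF bb.1).1) := by
            by_cases hc2 : ((bb.2.length : ℕ) : Int) > (pvF bb.1).1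
            · rw [if_pos hc2] at hfprev
              have h1 : ((bb.2.length : ℕ) : Int) = (m : Int) := congrArg Prod.fst hfprev
              constructor <;> intro _ <;> omega
            · rw [if_neg hc2] at hfprev
              have h1 : (pvF bb.1).1 = (m : Int) := congrArg Prod.fst hfprev
              rw [h1]
          have hA : pvStepA ((PySem.List.enumerate p).foldl pvStepA (0, 0, 0, 0)) (((p.length : ℕ) : Int), x)
              = if ((bb.2.length : Int) + 1 > (m : Int))
                then (((bb.2.length : Int) + 1), ((bb.2.length : Int) + 1), cs, cs)
                else ((m : Int), ((bb.2.length : Int) + 1), (bs : Int), cs) := by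
            rw [ha]; simp [pvStepA, hx, List.length_eq_zero_iff, hcur]
          have hrnew : pvRunsOf (pvStepB bb x) = bb.1 ++ [bb.2 ++ [x]] := by
            simp [pvRunsOf, hb2, hb1]
          by_cases hm : ((bb.2.length : Int) + 1 > (m : Int))
          · -- the extended run becomes the new (strictly longer) best
            refine ⟨bb.2.length + 1, p.length - bb.2.length, cs, ?_, ?_,
              by simp only [List.length_append, List.length_cons, List.length_nil]; omega,
              ⟨p0, by rw [hfoldB, hb2, hp0, List.append_assoc]⟩, ?_⟩
            · rw [hfoldA, hA, hfoldB, hb2, if_pos hm, hcsv]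
              simp only [Prod.mk.injEq, List.length_append, List.length_cons, List.length_nil]
              push_cast
              simp
            · intro _
              rw [hfoldB, hb2]
              simp only [List.length_append, List.length_cons, List.length_nil]
              rw [hcsv]; congr 1; omega
            · rw [hfoldB, hrnew, pvF_append _ _ (by simp)]
              rw [if_pos (by
                simp only [List.length_append, List.length_cons, List.length_nil]
                have h2 := hcond.mp hm
                push_cast at h2 ⊢
                omega)]
              have hi : p.length - bb.2.length = p0.length := by omega
              have hdrop : ((p ++ [x]).drop (p.length - bb.2.length)).take (bb.2.length + 1)
                  = bb.2 ++ [x] := by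
                rw [hi, hp0, List.append_assoc, List.drop_left,
                  List.take_of_length_le (by simp)]
              rw [hdrop]
              simp
          · -- previous best stays
            refine ⟨m, bs, cs, ?_, ?_,
              by simp only [List.length_append, List.length_cons, List.length_nil]; omega,
              ⟨p0, by rw [hfoldB, hb2, hp0, List.append_assoc]⟩, ?_⟩
            · rw [hfoldA, hA, hfoldB, hb2, if_neg hm]
              simp only [Prod.mk.injEq, List.length_append, List.length_cons, List.length_nil]
              push_cast
              simp
            · intro _
              rw [hfoldB, hb2]
              simp only [List.length_append, List.length_cons, List.length_nil]
              rw [hcsv]; congr 1; omega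
            · have hnc : ¬ ((bb.2.length : Int) + 1 > (pvF bb.1).1) := fun h => hm (hcond.mpr h)
              have hc2 : ¬ (((bb.2.length : ℕ) : Int) > (pvF bb.1).1) := by omega
              rw [if_neg hc2] at hfprev
              rw [hfoldB, hrnew, pvF_append _ _ (by simp)]
              rw [if_neg (by
                simp only [List.length_append, List.length_cons, List.length_nil]
                push_cast at hnc ⊢
                omega)]
              rw [hfprev, pv_take_drop_append p x bs m hle]
      · -- score < 50: the trailing run is closed (or stays empty); best unchanged
        have hb2 : (pvStepB bb x).2 = [] := by
          simp only [pvStepB, if_neg hx]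
          split <;> rfl
        have hA : pvStepA ((PySem.List.enumerate p).foldl pvStepA (0, 0, 0, 0)) (((p.length : ℕ) : Int), x)
            = ((m : Int), 0, (bs : Int), cs) := by
          rw [ha]; simp [pvStepA, hx]
        have hrnew : pvRunsOf (pvStepB bb x) = pvRunsOf bb := by
          by_cases hcur : bb.2 = []
          · simp [pvRunsOf, pvStepB, hx, hcur]
          · simp [pvRunsOf, pvStepB, hx, hcur]
        refine ⟨m, bs, cs, ?_, ?_,
          by simp only [List.length_append, List.length_cons, List.length_nil]; omega,
          ⟨p ++ [x], by rw [hfoldB, hb2]; simp⟩, ?_⟩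
        · rw [hfoldA, hA, hfoldB, hb2]; simp
        · intro h; rw [hfoldB, hb2] at h; simp at h
        · rw [hfoldB, hrnew, hf, pv_take_drop_append p x bs m hle]

-- ===== VERDICT (by name: the statement is the Claim_ definition above) =====
theorem maximum_number_students_above_average_spec : Claim_equal_maximum_number_students_above_average := by
  intro points _
  unfold Spec_maximum_number_students_above_average
  obtain ⟨m, bs, cs, ha, _, _, _, hf⟩ := pv_inv points
  rw [pv_alt_eq, hf, maximum_number_students_above_average]
  simp only [ha]
  rw [PySem.List.slice_natCast_add]
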